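-- pv_equiv track=rewrite | github.com/PeachyPeachSM64/sm64ex-omm | omm_builder.py | to_title
-- ===== SOURCE A (Python) =====
-- def to_title(s: str) -> str:
--     s = s.replace('_', ' ')
--     cap = True
--     for i in range(len(s)):
--         c = s[i]
--         is_letter = ((ord(c) >= ord('A') and ord(c) <= ord('Z')) or (ord(c) >= ord('a') and ord(c) <= ord('z')))
--         if cap and is_letter:
--             s = s[:i] + c.upper() + s[i + 1:]
--             cap = False
--         elif not is_letter:
--             cap = True
--     for i in range(1, len(s) - 1):
--         cp = s[i - 1]
--         cc = s[i]
--         cn = s[i + 1]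
--         if cc == '.' and (not (ord(cp) >= ord('0') and ord(cp) <= ord('9')) or not (ord(cn) >= ord('0') and ord(cn) <= ord('9'))):
--             s = s[:i] + ' ' + s[i + 1:]
--     return s
-- ===== SOURCE B (Python) =====
-- def to_title(s: str) -> str:
--     # Stateless: decide each output char from its (prev, cur, next) neighbor triple only.
--     # Correct because A's cap flag at i equals "s[i-1] is not a letter" (or i==0), and A's
--     # dot replacements never change any neighbor's letter/digit class.
--     t = s.replace('_', ' ')
--     def render(p, c, n):
--         if 'A' <= c <= 'Z' or 'a' <= c <= 'z':
--             return c.upper() if not (p and (('A' <= p <= 'Z') or ('a' <= p <= 'z'))) else c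
--         if c == '.' and p and n and not ('0' <= p <= '9' and '0' <= n <= '9'):
--             return ' '
--         return c
--     return ''.join(render(p, c, n)
--                    for p, c, n in zip([None] + list(t), t, list(t[1:]) + [None]))
-- ===== Notes on version B (the rewrite author's own statement) =====
-- stated objective: alternative
-- what changed: A makes two stateful index passes (a cap flag carried across iterations, re-slicing the string in place); B is a single stateless pass that zips each character with its two neighbors and decides capitalisation and dot-spacing from the (prev, cur, next) triple alone, using the facts that A's cap flag at a position is determined by whether the preceding character is a letter and that A's edits never change a neighbor's letter/digit class.
import Mathlib
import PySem

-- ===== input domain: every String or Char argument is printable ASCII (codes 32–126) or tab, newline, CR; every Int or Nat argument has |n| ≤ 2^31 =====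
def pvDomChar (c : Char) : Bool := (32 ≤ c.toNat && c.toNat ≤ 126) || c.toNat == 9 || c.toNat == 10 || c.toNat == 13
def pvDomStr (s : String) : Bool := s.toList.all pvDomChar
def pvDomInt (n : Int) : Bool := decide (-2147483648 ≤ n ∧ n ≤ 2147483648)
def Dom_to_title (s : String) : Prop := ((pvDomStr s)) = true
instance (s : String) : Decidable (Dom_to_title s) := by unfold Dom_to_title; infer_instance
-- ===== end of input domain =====

-- B replaces A's two stateful index loops (cap flag + in-place re-slicing) by ONE stateless
-- pass that decides each output char from its (prev, cur, next) neighbor triple (objective: alternative).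

-- ===== PORT A =====
-- the inline ord-range tests of A, named
def aLetter (c : Char) : Bool := (decide (65 ≤ c.toNat) && decide (c.toNat ≤ 90)) ||
                                 (decide (97 ≤ c.toNat) && decide (c.toNat ≤ 122))
def aDigit (c : Char) : Bool := decide (48 ≤ c.toNat) && decide (c.toNat ≤ 57)

-- loop body of A's first for-loop (capitalisation scan over indices, re-slicing s)
def stepA1 (st : List Char × Bool) (i : Int) : List Char × Bool :=
  let t := st.1
  let cap := st.2
  let c := PySem.List.pyGetD t i ' '
  if cap && aLetter c then
    (PySem.List.slice t none (some i) ++ PySem.Chars.upper [c] ++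
       PySem.List.slice t (some (i + 1)) none, false)
  else if !aLetter c then (t, true)
  else st

-- loop body of A's second for-loop (dot spacing over interior indices, re-slicing s)
def stepA2 (t : List Char) (i : Int) : List Char :=
  let cp := PySem.List.pyGetD t (i - 1) ' '
  let cc := PySem.List.pyGetD t i ' '
  let cn := PySem.List.pyGetD t (i + 1) ' '
  if cc == '.' && (!aDigit cp || !aDigit cn) then
    PySem.List.slice t none (some i) ++ [' '] ++ PySem.List.slice t (some (i + 1)) none
  else t

def to_title (s : String) : String :=
  let s1 := PySem.Chars.replace s.toList ['_'] [' ']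
  let s2 := ((PySem.List.pyRange 0 (s1.length : Int) 1).foldl stepA1 (s1, true)).1
  let s3 := (PySem.List.pyRange 1 ((s2.length : Int) - 1) 1).foldl stepA2 s2
  String.ofList s3

-- ===== PORT B =====
-- B's inline char-comparison tests, named
def bLetter (c : Char) : Bool := (decide ('A' ≤ c) && decide (c ≤ 'Z')) ||
                                 (decide ('a' ≤ c) && decide (c ≤ 'z'))
def bDigit (c : Char) : Bool := decide ('0' ≤ c) && decide (c ≤ '9')
-- truthiness tests on an optional neighbor ('p and letter(p)', 'digit(p)')
def optLetter : Option Char → Bool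
  | none => false
  | some c => bLetter c
def optDigit : Option Char → Bool
  | none => false
  | some c => bDigit c

-- B's render(p, c, n): decide the output char from the neighbor triple alone
def render (p : Option Char) (c : Char) (n : Option Char) : Char :=
  if bLetter c then
    (if !optLetter p then PySem.Chars.upperChar c else c)
  else if c == '.' && p.isSome && n.isSome && !(optDigit p && optDigit n) then ' '
  else c

def to_title_alt (s : String) : String :=
  let t := PySem.Chars.replace s.toList ['_'] [' ']
  let prevs : List (Option Char) := none :: t.map some
  let nexts : List (Option Char) := (PySem.List.slice t (some 1) none).map some ++ [none]
  String.ofList ((prevs.zip (t.zip nexts)).map (fun pcn => render pcn.1 pcn.2.1 pcn.2.2))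

-- ===== PRECONDITION & SPEC =====
def Spec_to_title (s : String) (out : String) : Prop := out = to_title_alt s
instance (s : String) (out : String) : Decidable (Spec_to_title s out) := by unfold Spec_to_title; infer_instance

-- ===== CLAIM (what is proved, stated in full; the proofs are below) =====
def Claim_equal_to_title : Prop := ∀ (s : String), Dom_to_title s → Spec_to_title s (to_title s)

-- ===== LEMMAS AND PROOFS =====

-- common description of pass 1 (capitalisation), structural over the char list
def pass1 : List Char → Bool → List Char
  | [], _ => []
  | c :: t, cap => (if cap && aLetter c then PySem.Chars.upper [c] else [c]) ++ pass1 t (!aLetter c)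

def capEnd : List Char → Bool → Bool
  | [], cap => cap
  | c :: t, _ => capEnd t (!aLetter c)

-- pointwise description of pass 2 (dot spacing) over the unchanging pass-1 result
def cond2 (l : List Char) (j : Nat) : Bool :=
  (l.getD j ' ' == '.') && decide (0 < j) && decide (j + 1 < l.length) &&
  !(aDigit (l.getD (j - 1) ' ') && aDigit (l.getD (j + 1) ' '))

def pass2 (l : List Char) : List Char :=
  (List.range l.length).map (fun j => if cond2 l j then ' ' else l.getD j ' ')

-- the dot condition read off the ORIGINAL (pass-1 input) characters
def condDot (t : List Char) (j : Nat) : Bool :=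
  (t.getD j ' ' == '.') && decide (0 < j) && decide (j + 1 < t.length) &&
  !(aDigit (t.getD (j - 1) ' ') && aDigit (t.getD (j + 1) ' '))

-- the combined pointwise value of A's two passes, in terms of the original characters
def gPt (t : List Char) (j : Nat) : Char :=
  if aLetter (t.getD j ' ') && (if j = 0 then true else !aLetter (t.getD (j - 1) ' ')) then
    PySem.Chars.upperChar (t.getD j ' ')
  else if condDot t j then ' '
  else t.getD j ' '

lemma upper_single (c : Char) : PySem.Chars.upper [c] = [PySem.Chars.upperChar c] := rfl

lemma char_le_toNat (a c : Char) : decide (a ≤ c) = decide (a.toNat ≤ c.toNat) := by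
  rw [decide_eq_decide, Char.le_def, UInt32.le_iff_toNat_le]; rfl

lemma bLetter_eq_aLetter (c : Char) : bLetter c = aLetter c := by
  rw [bLetter, aLetter, char_le_toNat, char_le_toNat, char_le_toNat, char_le_toNat]; rfl

lemma bDigit_eq_aDigit (c : Char) : bDigit c = aDigit c := by
  rw [bDigit, aDigit, char_le_toNat, char_le_toNat]; rfl

lemma cond2_lt (l : List Char) (j : Nat) (h : cond2 l j = true) : j + 1 < l.length := by
  simp [cond2] at h
  tauto

lemma cond2_dot (l : List Char) (j : Nat) (h : cond2 l j = true) : l.getD j ' ' = '.' := by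
  simp [cond2] at h
  tauto

-- a letter is not a digit and not a dot
lemma aLetter_not_digit (c : Char) (h : aLetter c = true) : aDigit c = false := by
  simp only [aLetter, Bool.or_eq_true, Bool.and_eq_true, decide_eq_true_eq] at h
  simp only [aDigit, Bool.and_eq_false_iff, decide_eq_false_iff_not]
  omega

lemma aLetter_not_dot (c : Char) (h : aLetter c = true) : (c == '.') = false := by
  simp only [beq_eq_false_iff_ne, ne_eq]
  intro he
  subst he
  simp [aLetter] at h

-- upper-casing a letter yields a letter-class char: not a digit, not a dot
lemma upperChar_not_digit_dot (c : Char) (h : aLetter c = true) :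
    aDigit (PySem.Chars.upperChar c) = false ∧ (PySem.Chars.upperChar c == '.') = false := by
  simp only [aLetter, Bool.or_eq_true, Bool.and_eq_true, decide_eq_true_eq] at h
  simp only [PySem.Chars.upperChar, PySem.Chars.islower, char_le_toNat, char_le_toNat]
  by_cases hl : ((decide (('a' : Char).toNat ≤ c.toNat)) && (decide (c.toNat ≤ ('z' : Char).toNat))) = true
  · rw [if_pos hl]
    simp only [Bool.and_eq_true, decide_eq_true_eq] at hl
    have h97 : 97 ≤ c.toNat := hl.1
    have h122 : c.toNat ≤ 122 := hl.2
    have ht : (Char.ofNat (c.toNat - 32)).toNat = c.toNat - 32 := by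
      unfold Char.ofNat
      rw [dif_pos (by constructor; omega)]
      rfl
    constructor
    · simp only [aDigit, Bool.and_eq_false_iff, decide_eq_false_iff_not, ht]; omega
    · simp only [beq_eq_false_iff_ne, ne_eq]
      intro he
      have : (Char.ofNat (c.toNat - 32)).toNat = ('.' : Char).toNat := by rw [he]
      rw [ht] at this
      simp only [show ('.' : Char).toNat = 46 from rfl] at this
      omega
  · rw [if_neg hl]
    simp only [Bool.and_eq_true, decide_eq_true_eq, not_and, not_le,
      show ('a' : Char).toNat = 97 from rfl, show ('z' : Char).toNat = 122 from rfl] at hl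
    constructor
    · simp only [aDigit, Bool.and_eq_false_iff, decide_eq_false_iff_not]; omega
    · simp only [beq_eq_false_iff_ne, ne_eq]
      intro he
      have : c.toNat = ('.' : Char).toNat := by rw [he]
      simp only [show ('.' : Char).toNat = 46 from rfl] at this
      omega

lemma foldA1 (rest done : List Char) (cap : Bool) :
    (PySem.List.pyRange (done.length : Int) ((done.length : Int) + rest.length) 1).foldl stepA1
      (done ++ rest, cap) = (done ++ pass1 rest cap, capEnd rest cap) := by
  induction rest generalizing done cap with
  | nil => simp [PySem.List.pyRange_one_eq_nil, pass1, capEnd]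
  | cons c t ih =>
    rw [PySem.List.pyRange_one_cons (by simp only [List.length_cons]; push_cast; omega), List.foldl_cons]
    have hget : PySem.List.pyGetD (done ++ c :: t) (done.length : Int) ' ' = c := by
      simp [PySem.List.pyGetD_natCast, List.getD_eq_getElem?_getD]
    have htake : PySem.List.slice (done ++ c :: t) none (some (done.length : Int)) = done := by
      rw [PySem.List.slice_to_natCast]; simp
    have hdrop : PySem.List.slice (done ++ c :: t) (some ((done.length : Int) + 1)) none = t := by
      have h1 : (done.length : Int) + 1 = ((done.length + 1 : Nat) : Int) := by omega
      rw [h1, PySem.List.slice_from_natCast,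
          show done ++ c :: t = (done ++ [c]) ++ t by simp,
          show done.length + 1 = (done ++ [c]).length by simp, List.drop_left]
    by_cases hcl : (cap && aLetter c) = true
    · have hl : aLetter c = true := by revert hcl; cases aLetter c <;> simp
      have hcap : cap = true := by revert hcl; cases cap <;> simp
      have hstep : stepA1 (done ++ c :: t, cap) (done.length : Int) =
          ((done ++ [PySem.Chars.upperChar c]) ++ t, false) := by
        simp [stepA1, hget, htake, hdrop, upper_single, hcl]
      rw [hstep,
          show ((done.length : Int) + 1) = (((done ++ [PySem.Chars.upperChar c]).length : Nat) : Int) by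
            simp,
          show ((done.length : Int) + ((c :: t).length : Int)) =
            (((done ++ [PySem.Chars.upperChar c]).length : Nat) : Int) + (t.length : Int) by
            simp; omega,
          ih]
      simp [pass1, capEnd, hl, hcap, upper_single]
    · have hstep : stepA1 (done ++ c :: t, cap) (done.length : Int) =
          ((done ++ [c]) ++ t, !aLetter c) := by
        by_cases hl : aLetter c = true
        · have hc : cap = false := by revert hcl; rw [hl]; cases cap <;> simp
          simp [stepA1, hget, hc, hl]
        · simp only [Bool.not_eq_true] at hl
          simp [stepA1, hget, hl]
      rw [hstep,
          show ((done.length : Int) + 1) = (((done ++ [c]).length : Nat) : Int) by simp,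
          show ((done.length : Int) + ((c :: t).length : Int)) =
            (((done ++ [c]).length : Nat) : Int) + (t.length : Int) by simp; omega,
          ih]
      simp [pass1, capEnd, hcl]

lemma foldA2 (l : List Char) (k : Nat) (hk : k + 1 ≤ l.length) :
    ((PySem.List.pyRange 1 (k : Int) 1).foldl stepA2 l).length = l.length ∧
    ∀ j : Nat, ((PySem.List.pyRange 1 (k : Int) 1).foldl stepA2 l).getD j ' ' =
      if j < k ∧ cond2 l j = true then ' ' else l.getD j ' ' := by
  induction k with
  | zero =>
    rw [show ((0:Nat):Int) = (0:Int) from rfl, PySem.List.pyRange_one_eq_nil (by omega)]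
    simp
  | succ k ih =>
    rcases Nat.eq_zero_or_pos k with hk0 | hk1
    · subst hk0
      rw [show ((0+1:Nat):Int) = (1:Int) from rfl, PySem.List.pyRange_one_eq_nil (by omega)]
      refine ⟨rfl, fun j => ?_⟩
      by_cases hj : j < 0 + 1 ∧ cond2 l j = true
      · exfalso
        obtain ⟨hj1, hj2⟩ := hj
        have : j = 0 := by omega
        subst this
        simp [cond2] at hj2
      · simp only [List.foldl_nil]
        rw [if_neg hj]
    · have hcast : ((k+1 : Nat) : Int) = (k:Int) + 1 := by push_cast; ring
      rw [hcast, PySem.List.pyRange_one_succ_right (by exact_mod_cast hk1),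
          List.foldl_append, List.foldl_cons, List.foldl_nil]
      obtain ⟨ihlen, ihget⟩ := ih (by omega)
      set t := (PySem.List.pyRange 1 (k:Int) 1).foldl stepA2 l with ht
      have hcp : PySem.List.pyGetD t ((k:Int) - 1) ' ' = t.getD (k-1) ' ' := by
        rw [show (k:Int) - 1 = ((k-1 : Nat) : Int) by omega, PySem.List.pyGetD_natCast]
      have hcc : PySem.List.pyGetD t (k:Int) ' ' = t.getD k ' ' := PySem.List.pyGetD_natCast t k ' '
      have hcn : PySem.List.pyGetD t ((k:Int) + 1) ' ' = t.getD (k+1) ' ' := by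
        rw [show (k:Int) + 1 = ((k+1:Nat):Int) by push_cast; ring, PySem.List.pyGetD_natCast]
      have hccv : t.getD k ' ' = l.getD k ' ' := by rw [ihget k]; simp
      have hcnv : t.getD (k+1) ' ' = l.getD (k+1) ' ' := by rw [ihget (k+1)]; simp
      have hdigp : aDigit (t.getD (k-1) ' ') = aDigit (l.getD (k-1) ' ') := by
        rw [ihget (k-1)]
        by_cases hc : cond2 l (k-1) = true
        · rw [if_pos ⟨by omega, hc⟩, cond2_dot l (k-1) hc]
          decide
        · simp [hc]
      have hcond : (PySem.List.pyGetD t (k:Int) ' ' == '.' &&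
          (!aDigit (PySem.List.pyGetD t ((k:Int) - 1) ' ') ||
           !aDigit (PySem.List.pyGetD t ((k:Int) + 1) ' '))) = cond2 l k := by
        rw [hcp, hcc, hcn, hccv, hcnv, hdigp, cond2]
        simp only [show (0 < k) = True by simp [hk1],
          show (k + 1 < l.length) = True by simp; omega, decide_true, Bool.and_true, Bool.not_and]
      have hlen_t : k + 1 ≤ t.length := by omega
      simp only [stepA2, hcond]
      by_cases hB : cond2 l k = true
      · rw [if_pos hB]
        have hsl1 : PySem.List.slice t none (some (k:Int)) = t.take k :=
          PySem.List.slice_to_natCast t k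
        have hsl2 : PySem.List.slice t (some ((k:Int) + 1)) none = t.drop (k+1) := by
          rw [show (k:Int) + 1 = ((k+1:Nat):Int) by push_cast; ring, PySem.List.slice_from_natCast]
        rw [hsl1, hsl2]
        have hlen' : (t.take k ++ [' '] ++ t.drop (k+1)).length = l.length := by
          simp [List.length_take, List.length_drop, ihlen]; omega
        refine ⟨hlen', fun j => ?_⟩
        have hget' : (t.take k ++ [' '] ++ t.drop (k+1)).getD j ' ' =
            if j = k then ' ' else t.getD j ' ' := by
          rcases lt_trichotomy j k with h | h | h
          · rw [if_neg (by omega)]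
            rw [List.getD_eq_getElem?_getD, List.getD_eq_getElem?_getD, List.append_assoc,
                List.getElem?_append_left (by rw [List.length_take]; omega),
                List.getElem?_take_of_lt h]
          · subst h
            rw [if_pos rfl, List.getD_eq_getElem?_getD, List.append_assoc,
                List.getElem?_append_right (by rw [List.length_take]; omega)]
            rw [List.length_take, Nat.min_eq_left (show j ≤ t.length by omega), Nat.sub_self]
            rfl
          · rw [if_neg (by omega)]
            rw [List.getD_eq_getElem?_getD, List.getD_eq_getElem?_getD, List.append_assoc,
                List.getElem?_append_right (by rw [List.length_take]; omega)]
            rw [List.length_take, Nat.min_eq_left (show k ≤ t.length by omega),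
                show j - k = (j - k - 1) + 1 by omega]
            simp only [List.singleton_append, List.getElem?_cons_succ, List.getElem?_drop]
            rw [show k + 1 + (j - k - 1) = j by omega]
        rw [hget']
        by_cases hjk : j = k
        · subst hjk
          rw [if_pos rfl, if_pos ⟨by omega, hB⟩]
        · rw [if_neg hjk, ihget j]
          by_cases hc : cond2 l j = true
          · by_cases hlt : j < k
            · rw [if_pos ⟨hlt, hc⟩, if_pos ⟨by omega, hc⟩]
            · rw [if_neg (by tauto), if_neg (by intro h; exact hlt (by omega))]
          · rw [if_neg (by tauto), if_neg (by tauto)]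
      · rw [if_neg hB]
        refine ⟨ihlen, fun j => ?_⟩
        rw [ihget j]
        by_cases hc : cond2 l j = true
        · by_cases hjk : j = k
          · subst hjk; exact absurd hc hB
          · by_cases hlt : j < k
            · rw [if_pos ⟨hlt, hc⟩, if_pos ⟨by omega, hc⟩]
            · rw [if_neg (by tauto), if_neg (by intro h; exact hlt (by omega))]
        · rw [if_neg (by tauto), if_neg (by tauto)]

lemma length_pass2 (l : List Char) : (pass2 l).length = l.length := by
  simp [pass2]

lemma A2_eq_pass2 (l : List Char) :
    (PySem.List.pyRange 1 ((l.length : Int) - 1) 1).foldl stepA2 l = pass2 l := by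
  rcases Nat.eq_zero_or_pos l.length with h0 | h1
  · rw [List.length_eq_zero_iff] at h0
    subst h0
    rw [show ((([] : List Char).length : Int) - 1) = (-1 : Int) by simp,
        PySem.List.pyRange_one_eq_nil (by omega)]
    rfl
  · have hcast : ((l.length : Int) - 1) = ((l.length - 1 : Nat) : Int) := by omega
    rw [hcast]
    obtain ⟨hlen, hget⟩ := foldA2 l (l.length - 1) (by omega)
    apply List.ext_getElem (by rw [hlen, length_pass2])
    intro j hj1 hj2
    have hjl : j < l.length := by rwa [hlen] at hj1
    have e1 := hget j
    rw [List.getD_eq_getElem?_getD, List.getElem?_eq_getElem hj1] at e1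
    simp only [Option.getD_some] at e1
    rw [e1]
    simp only [pass2, List.getElem_map, List.getElem_range]
    by_cases hc : cond2 l j = true
    · rw [if_pos ⟨by have := cond2_lt l j hc; omega, hc⟩, if_pos hc]
    · rw [if_neg (by tauto), if_neg hc, List.getD_eq_getElem?_getD,
          List.getElem?_eq_getElem hjl]

-- length of the first pass
lemma length_pass1 (t : List Char) (cap : Bool) : (pass1 t cap).length = t.length := by
  induction t generalizing cap with
  | nil => rfl
  | cons c t ih =>
    by_cases h : (cap && aLetter c) = true <;>
      simp [pass1, h, upper_single, ih]

-- pointwise value of the first pass, in terms of the original characters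
lemma pass1_getD (t : List Char) (cap : Bool) (j : Nat) (hj : j < t.length) :
    (pass1 t cap).getD j ' ' =
      if (aLetter (t.getD j ' ') && (if j = 0 then cap else !aLetter (t.getD (j - 1) ' '))) = true
      then PySem.Chars.upperChar (t.getD j ' ') else t.getD j ' ' := by
  induction t generalizing cap j with
  | nil => simp at hj
  | cons c t ih =>
    have hhd : pass1 (c :: t) cap =
        (if cap && aLetter c then PySem.Chars.upperChar c else c) :: pass1 t (!aLetter c) := by
      by_cases h : (cap && aLetter c) = true <;> simp [pass1, h, upper_single]
    rw [hhd]
    cases j with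
    | zero =>
      simp only [List.getD_cons_zero, if_pos rfl]
      by_cases h : aLetter c = true
      · simp [h, Bool.and_comm]
      · simp only [Bool.not_eq_true] at h
        simp [h]
    | succ k =>
      simp only [List.getD_cons_succ, Nat.add_sub_cancel]
      rw [ih (!aLetter c) k (by simpa using hj)]
      cases k with
      | zero => simp
      | succ m => simp

-- the first pass preserves the dot-test and digit-class of every position
lemma pass1_dot (t : List Char) (cap : Bool) (j : Nat) :
    ((pass1 t cap).getD j ' ' == '.') = (t.getD j ' ' == '.') := by
  by_cases hj : j < t.length
  · rw [pass1_getD t cap j hj]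
    by_cases h : (aLetter (t.getD j ' ') && (if j = 0 then cap else !aLetter (t.getD (j - 1) ' '))) = true
    · rw [if_pos h]
      have hl : aLetter (t.getD j ' ') = true := by
        revert h; cases aLetter (t.getD j ' ') <;> simp
      rw [(upperChar_not_digit_dot _ hl).2, aLetter_not_dot _ hl]
    · rw [if_neg h]
  · rw [List.getD_eq_default _ _ (by rw [length_pass1]; omega),
        List.getD_eq_default _ _ (by omega)]

lemma pass1_digit (t : List Char) (cap : Bool) (j : Nat) :
    aDigit ((pass1 t cap).getD j ' ') = aDigit (t.getD j ' ') := by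
  by_cases hj : j < t.length
  · rw [pass1_getD t cap j hj]
    by_cases h : (aLetter (t.getD j ' ') && (if j = 0 then cap else !aLetter (t.getD (j - 1) ' '))) = true
    · rw [if_pos h]
      have hl : aLetter (t.getD j ' ') = true := by
        revert h; cases aLetter (t.getD j ' ') <;> simp
      rw [(upperChar_not_digit_dot _ hl).1, aLetter_not_digit _ hl]
    · rw [if_neg h]
  · rw [List.getD_eq_default _ _ (by rw [length_pass1]; omega),
        List.getD_eq_default _ _ (by omega)]

lemma cond2_pass1 (t : List Char) (j : Nat) :
    cond2 (pass1 t true) j = condDot t j := by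
  rw [cond2, condDot, pass1_dot, pass1_digit, pass1_digit, length_pass1]

-- A's combined result is the pointwise map gPt
lemma A_eq_gPt (t : List Char) :
    pass2 (pass1 t true) = (List.range t.length).map (gPt t) := by
  apply List.ext_getElem (by rw [length_pass2, length_pass1]; simp)
  intro j hj1 hj2
  have hjt : j < t.length := by rw [length_pass2, length_pass1] at hj1; exact hj1
  simp only [pass2, List.getElem_map, List.getElem_range, gPt]
  rw [cond2_pass1, pass1_getD t true j hjt]
  by_cases h : (aLetter (t.getD j ' ') && (if j = 0 then true else !aLetter (t.getD (j - 1) ' '))) = true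
  · rw [if_pos h, if_pos h]
    have hl : aLetter (t.getD j ' ') = true := by
      revert h; cases aLetter (t.getD j ' ') <;> simp
    rw [if_neg (by rw [condDot, aLetter_not_dot _ hl]; simp)]
  · rw [if_neg h, if_neg h]

-- B's zip of neighbor triples is the same pointwise map gPt
lemma B_eq_gPt (t : List Char) :
    ((none :: t.map some).zip
        (t.zip ((PySem.List.slice t (some 1) none).map some ++ [none]))).map
      (fun pcn => render pcn.1 pcn.2.1 pcn.2.2) = (List.range t.length).map (gPt t) := by
  have hdrop : PySem.List.slice t (some 1) none = t.drop 1 := by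
    rw [show (1 : Int) = ((1 : Nat) : Int) from rfl, PySem.List.slice_from_natCast]
  rw [hdrop]
  have hlen : ((none :: t.map some).zip (t.zip ((t.drop 1).map some ++ [none]))).length
      = t.length := by
    rcases Nat.eq_zero_or_pos t.length with h0 | h1
    · rw [List.length_eq_zero_iff] at h0; subst h0; rfl
    · simp only [List.length_zip, List.length_cons, List.length_map, List.length_append,
        List.length_drop]
      omega
  apply List.ext_getElem (by simp only [List.length_map, List.length_range, hlen])
  intro j hj1 hj2
  have hjt : j < t.length := by
    rw [List.length_map, hlen] at hj1; exact hj1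
  rw [List.getElem_map, List.getElem_zip, List.getElem_zip, List.getElem_map, List.getElem_range]
  have hgd : t.getD j ' ' = t[j]'hjt := by
    rw [List.getD_eq_getElem?_getD, List.getElem?_eq_getElem hjt]; rfl
  have hprev : (none :: t.map some)[j]'(by simp; omega) =
      if hj0 : j = 0 then none else some (t[j-1]'(by omega)) := by
    cases j with
    | zero => rfl
    | succ k =>
      simp only [List.getElem_cons_succ, List.getElem_map]
      rw [dif_neg (by omega)]
      rfl
  have hnext : ((t.drop 1).map some ++ [none])[j]'(by
      simp only [List.length_append, List.length_map, List.length_drop, List.length_singleton]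
      omega) =
      if hjn : j + 1 < t.length then some (t[j+1]'hjn) else none := by
    by_cases hjn : j + 1 < t.length
    · rw [dif_pos hjn,
          List.getElem_append_left (by simp only [List.length_map, List.length_drop]; omega),
          List.getElem_map, List.getElem_drop]
      simp [Nat.add_comm]
    · rw [dif_neg hjn,
          List.getElem_append_right (by simp only [List.length_map, List.length_drop]; omega)]
      simp
  rw [hprev, hnext, render, gPt, bLetter_eq_aLetter, hgd]
  by_cases hj0 : j = 0
  · subst hj0
    rw [dif_pos rfl]
    have hc0 : condDot t 0 = false := by simp [condDot]
    by_cases hl : aLetter (t[0]'hjt) = true <;>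
      simp [optLetter, hl, hc0]
  · rw [dif_neg hj0, if_neg hj0]
    have hj1' : j - 1 < t.length := by omega
    have hgdp : t.getD (j-1) ' ' = t[j-1]'hj1' := by
      rw [List.getD_eq_getElem?_getD, List.getElem?_eq_getElem hj1']; rfl
    have d1 : decide (0 < j) = true := by simp; omega
    by_cases hjn : j + 1 < t.length
    · rw [dif_pos hjn]
      have hgdn : t.getD (j+1) ' ' = t[j+1]'hjn := by
        rw [List.getD_eq_getElem?_getD, List.getElem?_eq_getElem hjn]; rfl
      have d2 : decide (j + 1 < t.length) = true := by simp [hjn]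
      rw [condDot, hgd, hgdp, hgdn, d1, d2]
      by_cases hl : aLetter (t[j]'hjt) = true
      · have hnd := aLetter_not_dot _ hl
        by_cases hp : aLetter (t[j-1]'hj1') = true <;>
          simp [optLetter, bLetter_eq_aLetter, hl, hp, hnd]
      · simp only [Bool.not_eq_true] at hl
        simp [optLetter, optDigit, bLetter_eq_aLetter, bDigit_eq_aDigit, hl]
    · rw [dif_neg hjn]
      have hcF : condDot t j = false := by rw [condDot]; simp [hjn]
      rw [hcF, hgdp]
      by_cases hl : aLetter (t[j]'hjt) = true
      · by_cases hp : aLetter (t[j-1]'hj1') = true <;>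
          simp [optLetter, bLetter_eq_aLetter, hl, hp]
      · simp only [Bool.not_eq_true] at hl
        simp [optLetter, hl]

-- ===== VERDICT (by name: the statement is the Claim_ definition above) =====
theorem to_title_spec : Claim_equal_to_title := by
  unfold Claim_equal_to_title
  intro s _
  unfold Spec_to_title to_title to_title_alt
  have h1 : ((PySem.List.pyRange 0 ((PySem.Chars.replace s.toList ['_'] [' ']).length : Int) 1).foldl
      stepA1 (PySem.Chars.replace s.toList ['_'] [' '], true)).1
      = pass1 (PySem.Chars.replace s.toList ['_'] [' ']) true := by
    have := foldA1 (PySem.Chars.replace s.toList ['_'] [' ']) [] true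
    simp only [List.length_nil, Nat.cast_zero, zero_add, List.nil_append] at this
    simp [this]
  simp only [h1]
  rw [A2_eq_pass2, A_eq_gPt, B_eq_gPt]
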